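-- pv_equiv track=rewrite | github.com/logicmaker256-prog/babanuki | baba_nuki.py | remove_pairs_with_index_tracking
-- ===== SOURCE A (Python) =====
-- def rank_of(card):
--     return card[:-1] if card != "JOKER" else "JOKER"
--
-- def remove_pairs_with_index_tracking(hand, obs_map):
--     """
--     hand: list of card strings (order matters)
--     obs_map: dict mapping old_index -> rank for *公開で観測済み* の位置（部分的）
--     戻り: (new_hand, new_obs_map)
--
--     動作:
--     - 各ランクごとに出現インデックスを集める
--     - ジョーカーは残す（ペアにならない）
--     - それ以外のランクは、偶数枚なら全部消える。奇数枚なら1枚だけ残す（最初に現れたものを残す）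
--     - 残ったインデックスを昇順で並べ直し、新ハンドを作る
--     - obs_map のうち残るものだけ新しい index にマップし直して返す
--     （これにより「どの位置に公開カードがあるか」の整合性を保ちます）
--     """
--     # ランク -> インデックスリスト
--     rank_indices = {}
--     for idx, card in enumerate(hand):
--         r = rank_of(card)
--         rank_indices.setdefault(r, []).append(idx)
--
--     kept_indices = []
--     for r, idxs in rank_indices.items():
--         if r == "JOKER":
--             # ジョーカーは絶対残す（ペアにならない）
--             kept_indices.extend(idxs)
--         else:
--             # 偶数なら全部消える。奇数なら最初の1つを残す（安定性のため）
--             if len(idxs) % 2 == 1: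
--                 kept_indices.append(idxs[0])
--             # 偶数なら none を kept に入れない（すべて捨てられる）
--     kept_indices.sort()
--
--     # 新しい手札を作る
--     new_hand = [hand[i] for i in kept_indices]
--     # old_index -> new_index マップ
--     mapping = {old_idx: new_idx for new_idx, old_idx in enumerate(kept_indices)}
--
--     # 観測マップを更新（残っている observed index のみ）
--     new_obs = {}
--     for old_idx, r in obs_map.items():
--         if old_idx in mapping:
--             new_obs[mapping[old_idx]] = r
--         # もし観測していたカードが捨てられたら、その観測は消える（カード自体が無くなった）
--
--     return new_hand, new_obs
-- ===== SOURCE B (Python) =====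
-- def rank_of(card):
--     return card[:-1] if card != "JOKER" else "JOKER"
--
-- def remove_pairs_with_index_tracking(hand, obs_map):
--     # Greedy right-to-left pair matching: scan the hand backwards with a dict of
--     # pending (unmatched) occurrences per rank; a new occurrence cancels the pending
--     # one, jokers are kept outright.  What survives the matching is exactly the
--     # jokers plus the first occurrence of each odd-count rank.  A boolean keep-array
--     # then drives a single forward pass that builds the new hand and the old->new
--     # index mapping; no per-rank grouping, no counting, no sort.
--     n = len(hand)
--     keep = [False] * n
--     pending = {}
--     for i in range(n - 1, -1, -1):
--         r = rank_of(hand[i])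
--         if r == "JOKER":
--             keep[i] = True
--         elif r in pending:
--             del pending[r]
--         else:
--             pending[r] = i
--     for i in pending.values():
--         keep[i] = True
--     new_hand = []
--     mapping = {}
--     for i in range(n):
--         if keep[i]:
--             mapping[i] = len(new_hand)
--             new_hand.append(hand[i])
--     new_obs = {}
--     for old_idx, r in obs_map.items():
--         if old_idx in mapping:
--             new_obs[mapping[old_idx]] = r
--     return new_hand, new_obs
-- ===== Notes on version B (the rewrite author's own statement) =====
-- stated objective: alternative
-- what changed: A groups indices per rank into a dict of index lists, keeps jokers and the first index of odd-sized groups, sorts the kept indices and builds the mapping in separate passes; B never groups or counts: it scans the hand right-to-left greedily cancelling pairs through a dict of pending unmatched occurrences (jokers kept outright, survivors = first occurrence of each odd-count rank), then a boolean keep-array drives one forward pass building new_hand and the old-to-new mapping, with no sort.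
import Mathlib
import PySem

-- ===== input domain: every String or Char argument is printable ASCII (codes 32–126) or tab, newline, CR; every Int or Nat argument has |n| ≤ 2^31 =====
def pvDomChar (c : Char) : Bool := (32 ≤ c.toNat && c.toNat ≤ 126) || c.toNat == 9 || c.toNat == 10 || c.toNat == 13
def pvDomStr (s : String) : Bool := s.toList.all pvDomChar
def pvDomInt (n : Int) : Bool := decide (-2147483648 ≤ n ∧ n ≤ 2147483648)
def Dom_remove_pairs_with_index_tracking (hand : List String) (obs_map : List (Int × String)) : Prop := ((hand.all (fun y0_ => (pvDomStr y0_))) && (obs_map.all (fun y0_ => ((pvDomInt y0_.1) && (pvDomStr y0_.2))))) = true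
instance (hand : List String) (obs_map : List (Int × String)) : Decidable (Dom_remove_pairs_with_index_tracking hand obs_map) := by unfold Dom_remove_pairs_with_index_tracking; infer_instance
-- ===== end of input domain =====

-- B replaces A's per-rank grouping dict, odd/even group logic and sort of the kept indices
-- by a greedy right-to-left pair-matching scan (a dict of pending unmatched occurrences;
-- a new occurrence cancels the pending one, jokers are kept outright) followed by one
-- forward pass over a boolean keep-array that builds new_hand and the old-to-new index
-- mapping; no grouping, no counting, no sort (objective: alternative).

-- ===== PORT A =====
-- shared module-level helper: card[:-1] if card != "JOKER" else "JOKER"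
def rank_of (card : String) : String :=
  if card ≠ "JOKER" then PySem.Str.slice card none (some (-1)) else "JOKER"

def remove_pairs_with_index_tracking (hand : List String) (obs_map : List (Int × String)) : List String × (List (Int × String)) :=
  -- rank_indices.setdefault(r, []).append(idx)  ==  modify r [] (· ++ [idx])
  let rank_indices : PySem.Dict String (List Int) :=
    (PySem.List.enumerate hand 0).foldl
      (fun d p => d.modify (rank_of p.2) [] (fun l => l ++ [p.1])) PySem.Dict.empty
  let kept_indices : List Int :=
    rank_indices.items.foldl
      (fun acc q =>
        if q.1 == "JOKER" then acc ++ q.2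
        else if q.2.length % 2 == 1 then acc ++ [PySem.List.pyGetD q.2 0 0]  -- idxs[0]; exact: idxs is nonempty for every stored rank
        else acc)
      []
  let kept_sorted : List Int := PySem.List.sorted kept_indices (fun x => x)
  let new_hand : List String := kept_sorted.map (fun i => PySem.List.pyGetD hand i "")  -- hand[i]; exact: every kept index is in range
  let mapping : PySem.Dict Int Int :=
    (PySem.List.enumerate kept_sorted 0).foldl (fun d p => d.insert p.2 p.1) PySem.Dict.empty
  let new_obs : PySem.Dict Int String :=
    obs_map.foldl
      (fun d p => if mapping.contains p.1 then d.insert (mapping.getD p.1 0) p.2 else d)  -- getD guarded by contains: exact for mapping[old_idx]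
      PySem.Dict.empty
  (new_hand, new_obs.items)

-- ===== PORT B =====
-- body of B's backward loop over i = n-1, …, 0
def pvStepB (hand : List String) (st : List Bool × PySem.Dict String Int) (i : Int) : List Bool × PySem.Dict String Int :=
  let r := rank_of (PySem.List.pyGetD hand i "")  -- hand[i]; exact: 0 ≤ i < len(hand) in this loop
  if r == "JOKER" then (st.1.set i.toNat true, st.2)  -- keep[i] = True; exact: 0 ≤ i < len(keep)
  else if st.2.contains r then (st.1, st.2.erase r)
  else (st.1, st.2.insert r i)

def remove_pairs_with_index_tracking_alt (hand : List String) (obs_map : List (Int × String)) : List String × (List (Int × String)) :=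
  let n : Int := (hand.length : Int)
  let st1 : List Bool × PySem.Dict String Int :=
    (PySem.List.pyRange (n - 1) (-1) (-1)).foldl (pvStepB hand)
      (List.replicate hand.length false, PySem.Dict.empty)
  let keep : List Bool := st1.2.values.foldl (fun k i => k.set i.toNat true) st1.1  -- keep[i] = True; exact: pending values are in range
  let st2 : List String × PySem.Dict Int Int :=
    (PySem.List.pyRange 0 n 1).foldl
      (fun st i =>
        if keep.getD i.toNat false then  -- keep[i]; exact: 0 ≤ i < len(keep)
          (st.1 ++ [PySem.List.pyGetD hand i ""], st.2.insert i (st.1.length : Int))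
        else st)
      ([], PySem.Dict.empty)
  let new_obs : PySem.Dict Int String :=
    obs_map.foldl
      (fun d p => if st2.2.contains p.1 then d.insert (st2.2.getD p.1 0) p.2 else d)
      PySem.Dict.empty
  (st2.1, new_obs.items)

-- ===== PRECONDITION & SPEC =====
def Spec_remove_pairs_with_index_tracking (hand : List String) (obs_map : List (Int × String)) (out : List String × (List (Int × String))) : Prop := out = remove_pairs_with_index_tracking_alt hand obs_map
instance (hand : List String) (obs_map : List (Int × String)) (out : List String × (List (Int × String))) : Decidable (Spec_remove_pairs_with_index_tracking hand obs_map out) := by unfold Spec_remove_pairs_with_index_tracking; infer_instance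

-- ===== CLAIM (what is proved, stated in full; the proofs are below) =====
def Claim_equal_remove_pairs_with_index_tracking : Prop := ∀ (hand : List String) (obs_map : List (Int × String)), Dom_remove_pairs_with_index_tracking hand obs_map → Spec_remove_pairs_with_index_tracking hand obs_map (remove_pairs_with_index_tracking hand obs_map)

-- ===== LEMMAS AND PROOFS =====

-- the keep-predicate both programs realise, as a pure function of an (index, card) pair of `enumerate hand 0`
def pvKeep (hand : List String) (p : Int × String) : Bool :=
  rank_of p.2 == "JOKER" ||
    (PySem.List.count (hand.map rank_of) (rank_of p.2) % 2 == 1 &&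
      ((PySem.List.index? (hand.map rank_of) (rank_of p.2)).map Int.ofNat == some p.1))

-- the kept (index, card) pairs, in hand order
def pvKeptP (hand : List String) : List (Int × String) :=
  (PySem.List.enumerate hand 0).filter (pvKeep hand)

-- the kept old indices, ascending
def pvKept (hand : List String) : List Int := (pvKeptP hand).map (fun p => p.1)

-- the indices of hand whose card has rank r, ascending
def pvIdxs (hand : List String) (r : String) : List Int :=
  ((PySem.List.enumerate hand 0).filter (fun p => rank_of p.2 == r)).map (fun p => p.1)

-- A's per-rank contribution to kept_indices
def pvBlk (hand : List String) (r : String) : List Int :=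
  if r == "JOKER" then pvIdxs hand r
  else if (pvIdxs hand r).length % 2 == 1 then [PySem.List.pyGetD (pvIdxs hand r) 0 0]
  else []

-- A's grouping fold
def pvGroups (hand : List String) : PySem.Dict String (List Int) :=
  (PySem.List.enumerate hand 0).foldl
    (fun d p => d.modify (rank_of p.2) [] (fun l => l ++ [p.1])) PySem.Dict.empty

theorem pvB_fold_inv (q : Int × String → Bool) (l : List (Int × String))
    (nh : List String) (mp : PySem.Dict Int Int) :
    l.foldl (fun st p => if q p then (st.1 ++ [p.2], st.2.insert p.1 (st.1.length : Int)) else st) (nh, mp)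
      = (nh ++ (l.filter q).map (fun p => p.2),
         (PySem.List.enumerate ((l.filter q).map (fun p => p.1)) (nh.length : Int)).foldl
           (fun d r => d.insert r.2 r.1) mp) := by
  induction l generalizing nh mp with
  | nil => simp
  | cons p t ih =>
    by_cases hq : q p
    · simp only [List.foldl_cons, hq, if_pos, List.filter_cons_of_pos hq, List.map_cons,
        PySem.List.enumerate_cons, ih]
      simp [List.append_assoc]
    · simp [List.foldl_cons, hq, List.filter_cons_of_neg, ih]

theorem pvMem_idxs (hand : List String) (r : String) (i : Int) :
    i ∈ pvIdxs hand r ↔ ∃ (k : Nat) (h : k < hand.length), i = (k : Int) ∧ rank_of hand[k] = r := by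
  simp only [pvIdxs, List.mem_map, List.mem_filter, PySem.List.mem_enumerate_iff]
  constructor
  · rintro ⟨p, ⟨⟨k, hk, rfl⟩, hr⟩, rfl⟩
    refine ⟨k, hk, by simp, ?_⟩
    simpa using hr
  · rintro ⟨k, hk, rfl, hr⟩
    exact ⟨((k : Int), hand[k]), ⟨⟨k, hk, by simp⟩, by simpa using hr⟩, rfl⟩

theorem pvIdxs_pairwise (hand : List String) (r : String) :
    (pvIdxs hand r).Pairwise (· < ·) :=
  List.Pairwise.map _ (fun _ _ h => h) ((PySem.List.pairwise_lt_enumerate hand 0).filter _)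

theorem pvIdxs_length (hand : List String) (r : String) :
    (pvIdxs hand r).length = PySem.List.count (hand.map rank_of) r := by
  simp only [pvIdxs, List.length_map, ← List.countP_eq_length_filter]
  rw [PySem.List.count_eq, List.count_eq_countP]
  rw [← PySem.List.map_snd_enumerate hand 0, List.map_map, List.countP_map]
  simp [Function.comp_def]

theorem pvIdxs_head_gen (hand : List String) (r : String) (s : Int) (h : r ∈ hand.map rank_of) :
    ∃ (k : Nat) (t : List Int), PySem.List.index? (hand.map rank_of) r = some k ∧
      ((PySem.List.enumerate hand s).filter (fun p => rank_of p.2 == r)).map (fun p => p.1)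
        = (s + (k : Int)) :: t := by
  induction hand generalizing s with
  | nil => simp at h
  | cons c cs ih =>
    by_cases hc : rank_of c = r
    · refine ⟨0, ((PySem.List.enumerate cs (s+1)).filter (fun p => rank_of p.2 == r)).map (fun p => p.1), ?_, ?_⟩
      · rw [List.map_cons, hc]
        exact PySem.List.index?_cons_self r _
      · rw [PySem.List.enumerate_cons, List.filter_cons_of_pos (by simpa using hc)]
        simp
    · have hr : r ∈ cs.map rank_of := by
        rcases List.mem_map.mp h with ⟨x, hx, hxr⟩
        rcases List.mem_cons.mp hx with rfl | hx'
        · exact absurd hxr hc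
        · exact List.mem_map.mpr ⟨x, hx', hxr⟩
      rcases ih (s + 1) hr with ⟨k, t, hidx, hlist⟩
      refine ⟨k + 1, t, ?_, ?_⟩
      · rw [List.map_cons, PySem.List.index?_cons_of_ne _ hc, hidx]
        rfl
      · rw [PySem.List.enumerate_cons, List.filter_cons_of_neg (by simpa using hc), hlist]
        congr 1
        push_cast
        ring

theorem pvIdxs_head (hand : List String) (r : String) (h : r ∈ hand.map rank_of) :
    ∃ (k : Nat) (t : List Int), PySem.List.index? (hand.map rank_of) r = some k ∧
      pvIdxs hand r = (k : Int) :: t := by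
  rcases pvIdxs_head_gen hand r 0 h with ⟨k, t, hidx, hlist⟩
  exact ⟨k, t, hidx, by simpa [pvIdxs] using hlist⟩

theorem pvGroups_getD (hand : List String) (r : String) :
    (pvGroups hand).getD r [] = pvIdxs hand r := by
  have h : ((PySem.List.enumerate hand 0).map (fun p => (rank_of p.2, p.1))).foldl
      (fun (d : PySem.Dict String (List Int)) q => d.modify q.1 [] (fun l => l ++ [q.2])) PySem.Dict.empty
      = pvGroups hand := by
    rw [List.foldl_map]
    rfl
  rw [← h, PySem.Dict.getD_foldl_modify_append]
  rw [List.filter_map, List.map_map]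
  simp [pvIdxs, Function.comp_def]

theorem pvGroups_keys (hand : List String) :
    (pvGroups hand).keys = PySem.Set.ofList (hand.map rank_of) := by
  have h := PySem.Dict.keys_foldl_modify_key (PySem.List.enumerate hand 0)
    (fun p => rank_of p.2) ([] : List Int) (fun _ p l => l ++ [p.1]) PySem.Dict.empty
  have h2 : (PySem.List.enumerate hand 0).map (fun p => rank_of p.2) = hand.map rank_of := by
    rw [← PySem.List.map_snd_enumerate hand 0, List.map_map]
    simp [Function.comp_def]
  rw [pvGroups]
  rw [h, h2]
  simp [PySem.Set.update_nil_left]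

theorem pvKept0_eq_flatMap (hand : List String) :
    ((pvGroups hand).items).foldl
        (fun acc q =>
          if q.1 == "JOKER" then acc ++ q.2
          else if q.2.length % 2 == 1 then acc ++ [PySem.List.pyGetD q.2 0 0]
          else acc) []
      = (PySem.Set.ofList (hand.map rank_of)).flatMap (pvBlk hand) := by
  have hstep : (fun (acc : List Int) (q : String × List Int) =>
      if q.1 == "JOKER" then acc ++ q.2
      else if q.2.length % 2 == 1 then acc ++ [PySem.List.pyGetD q.2 0 0]
      else acc)
    = fun acc q => acc ++ (if q.1 == "JOKER" then q.2
        else if q.2.length % 2 == 1 then [PySem.List.pyGetD q.2 0 0] else []) := by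
    funext acc q
    split_ifs <;> simp
  rw [hstep, PySem.List.foldl_append_eq_flatMap, List.nil_append]
  have hnd : (pvGroups hand).keys.Nodup := by
    rw [pvGroups_keys]
    exact PySem.Set.nodup_ofList _
  rw [PySem.Dict.items_eq_map_keys _ hnd ([] : List Int), pvGroups_keys, List.flatMap_map]
  congr 1
  funext r
  simp [pvBlk, pvGroups_getD]

theorem pvMem_blk_sub (hand : List String) (r : String) (i : Int) (h : i ∈ pvBlk hand r) :
    i ∈ pvIdxs hand r := by
  unfold pvBlk at h
  split_ifs at h with h1 h2
  · exact h
  · rcases hx : pvIdxs hand r with _ | ⟨x, t⟩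
    · rw [hx] at h2
      simp at h2
    · have hh : PySem.List.pyGetD (x :: t) 0 0 = x := by
        simp [PySem.List.pyGetD, PySem.List.pyGet?, PySem.List.pyIdx?]
      rw [hx, hh] at h
      simp at h
      simp [h]
  · simp at h

theorem pvMem_kept (hand : List String) (i : Int) :
    i ∈ pvKept hand ↔ ∃ (k : Nat) (h : k < hand.length), i = (k : Int) ∧ pvKeep hand ((k : Int), hand[k]) := by
  simp only [pvKept, pvKeptP, List.mem_map, List.mem_filter, PySem.List.mem_enumerate_iff]
  constructor
  · rintro ⟨p, ⟨⟨k, hk, rfl⟩, hr⟩, rfl⟩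
    refine ⟨k, hk, by simp, ?_⟩
    simpa using hr
  · rintro ⟨k, hk, rfl, hr⟩
    exact ⟨((k : Int), hand[k]), ⟨⟨k, hk, by simp⟩, by simpa using hr⟩, rfl⟩

theorem pvMemA_iff (hand : List String) (i : Int) :
    (∃ r ∈ PySem.Set.ofList (hand.map rank_of), i ∈ pvBlk hand r) ↔ i ∈ pvKept hand := by
  constructor
  · rintro ⟨r, hrmem, hblk⟩
    rw [PySem.Set.mem_ofList] at hrmem
    unfold pvBlk at hblk
    split_ifs at hblk with hJ hodd
    · have hJ' : r = "JOKER" := by simpa using hJ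
      rcases (pvMem_idxs hand r i).mp hblk with ⟨k, hk, rfl, hrk⟩
      refine (pvMem_kept hand _).mpr ⟨k, hk, rfl, ?_⟩
      simp [pvKeep, hrk, hJ']
    · rcases pvIdxs_head hand r hrmem with ⟨k0, t, hidx, hlist⟩
      rw [hlist] at hblk
      have hhead : PySem.List.pyGetD ((k0 : Int) :: t) 0 0 = (k0 : Int) := by
        simp [PySem.List.pyGetD, PySem.List.pyGet?, PySem.List.pyIdx?]
      rw [hhead] at hblk
      simp only [List.mem_singleton] at hblk
      subst hblk
      rcases PySem.List.getElem_of_index?_eq_some hidx with ⟨hk0, hget, _⟩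
      have hk0' : k0 < hand.length := by simpa using hk0
      have hrank : rank_of hand[k0] = r := by
        rw [← hget]
        simp
      have hodd' : (pvIdxs hand r).length % 2 = 1 := by simpa using hodd
      rw [pvIdxs_length] at hodd'
      rw [PySem.List.count_eq] at hodd'
      refine (pvMem_kept hand _).mpr ⟨k0, hk0', rfl, ?_⟩
      unfold pvKeep
      dsimp only
      rw [hrank, hidx]
      simp [hodd']
    · simp at hblk
  · intro hmem
    rcases (pvMem_kept hand i).mp hmem with ⟨k, hk, rfl, hkeep⟩
    have hr0mem : rank_of hand[k] ∈ hand.map rank_of :=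
      List.mem_map.mpr ⟨hand[k], List.getElem_mem hk, rfl⟩
    by_cases hJ : rank_of hand[k] = "JOKER"
    · refine ⟨"JOKER", ?_, ?_⟩
      · rw [PySem.Set.mem_ofList]
        exact hJ ▸ hr0mem
      · unfold pvBlk
        rw [if_pos (by simp)]
        exact (pvMem_idxs hand "JOKER" _).mpr ⟨k, hk, rfl, hJ⟩
    · simp only [pvKeep, Bool.or_eq_true, Bool.and_eq_true, beq_iff_eq] at hkeep
      rcases hkeep with h1 | ⟨hcnt, hidx2⟩
      · exact absurd h1 hJ
      · refine ⟨rank_of hand[k], by rw [PySem.Set.mem_ofList]; exact hr0mem, ?_⟩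
        rcases pvIdxs_head hand (rank_of hand[k]) hr0mem with ⟨k0, t, hidx, hlist⟩
        have hkk0 : (k0 : Int) = (k : Int) := by
          rw [hidx] at hidx2
          simpa using hidx2
        unfold pvBlk
        rw [if_neg (by simpa using hJ)]
        have hoddb : ((pvIdxs hand (rank_of hand[k])).length % 2 == 1) = true := by
          rw [pvIdxs_length]
          simpa using hcnt
        rw [if_pos hoddb, hlist, hkk0]
        have hh : PySem.List.pyGetD ((k : Int) :: t) 0 0 = (k : Int) := by
          simp [PySem.List.pyGetD, PySem.List.pyGet?, PySem.List.pyIdx?]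
        simp [hh]

theorem pvKept_pairwise (hand : List String) :
    (pvKept hand).Pairwise (· < ·) :=
  List.Pairwise.map _ (fun _ _ h => h) ((PySem.List.pairwise_lt_enumerate hand 0).filter _)

theorem pvKept0_nodup (hand : List String) :
    ((PySem.Set.ofList (hand.map rank_of)).flatMap (pvBlk hand)).Nodup := by
  rw [List.nodup_flatMap]
  constructor
  · intro r _
    unfold pvBlk
    split_ifs
    · exact (pvIdxs_pairwise hand r).imp (fun h => ne_of_lt h)
    · exact List.nodup_singleton _
    · exact List.nodup_nil
  · refine (PySem.Set.nodup_ofList _).imp ?_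
    intro a b hab i hia hib
    rcases (pvMem_idxs hand a i).mp (pvMem_blk_sub hand a i hia) with ⟨k, hk, rfl, hra⟩
    rcases (pvMem_idxs hand b _).mp (pvMem_blk_sub hand b _ hib) with ⟨k', hk', hkk', hrb⟩
    have : k = k' := by exact_mod_cast hkk'
    subst this
    exact hab (hra ▸ hrb ▸ rfl)

theorem pvKeptA_eq (hand : List String) :
    PySem.List.sorted
      (((pvGroups hand).items).foldl
        (fun acc q =>
          if q.1 == "JOKER" then acc ++ q.2
          else if q.2.length % 2 == 1 then acc ++ [PySem.List.pyGetD q.2 0 0]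
          else acc)
        [])
      (fun x => x)
      = pvKept hand := by
  rw [pvKept0_eq_flatMap]
  apply PySem.List.sorted_eq_of_perm_of_pairwise_lt
  · apply (List.perm_ext_iff_of_nodup ?_ (pvKept0_nodup hand)).mpr
    · intro a
      rw [List.mem_flatMap]
      exact (pvMemA_iff hand a).symm
    · exact (pvKept_pairwise hand).imp (fun h => ne_of_lt h)
  · exact pvKept_pairwise hand

theorem pvNewHand (hand : List String) :
    (pvKept hand).map (fun i => PySem.List.pyGetD hand i "") = (pvKeptP hand).map (fun p => p.2) := by
  unfold pvKept
  rw [List.map_map]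
  apply List.map_congr_left
  intro p hp
  have hp' := List.mem_of_mem_filter hp
  rcases (PySem.List.mem_enumerate_iff _ _ _).mp hp' with ⟨k, hk, rfl⟩
  simp only [Function.comp_def]
  rw [show (0 : Int) + (k : Int) = ((k : Nat) : Int) from by simp,
    PySem.List.pyGetD_natCast]
  exact List.getD_eq_getElem hand "" hk

-- ===== B-side lemmas: the backward pair-matching scan =====

-- the keep-array after the backward scan has reached index t (jokers at positions ≥ t)
def pvKeepArr (hand : List String) (t : Nat) : List Bool :=
  (List.range hand.length).map (fun k => decide (t ≤ k) && (rank_of (hand.getD k "") == "JOKER"))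

-- specification of the pending dict after the scan has processed indices ≥ t
def pvPendSpec (hand : List String) (t : Nat) (r : String) : Option Int :=
  if r = "JOKER" then none
  else match PySem.List.index? ((hand.map rank_of).drop t) r with
    | none => none
    | some j => if ((hand.map rank_of).drop t).count r % 2 = 1 then some ((t : Int) + (j : Int)) else none

theorem pvGet?_erase_self (d : PySem.Dict String Int) (k : String) :
    (d.erase k).get? k = none := by
  rw [PySem.Dict.erase.eq_def, PySem.Dict.get?.eq_def]
  have : List.find? (fun p => p.1 == k) (List.filter (fun p => !(p.1 == k)) d.items) = none := by
    rw [List.find?_eq_none]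
    intro x hx
    have := List.of_mem_filter hx
    simp at this ⊢
    exact this
  simp [this]

theorem pvFind?_filter_ne (l : List (String × Int)) (k k' : String) (h : k' ≠ k) :
    List.find? (fun p => p.1 == k') (l.filter (fun p => !(p.1 == k)))
      = List.find? (fun p => p.1 == k') l := by
  induction l with
  | nil => rfl
  | cons p t ih =>
    by_cases hp : p.1 = k
    · rw [List.filter_cons_of_neg (by simp [hp]), ih, List.find?_cons_of_neg (by simp [hp, h.symm])]
    · rw [List.filter_cons_of_pos (by simpa using hp)]
      by_cases hp' : p.1 = k'
      · rw [List.find?_cons_of_pos (by simpa using hp'), List.find?_cons_of_pos (by simpa using hp')]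
      · rw [List.find?_cons_of_neg (by simpa using hp'), List.find?_cons_of_neg (by simpa using hp'), ih]

theorem pvGet?_erase_of_ne (d : PySem.Dict String Int) (k k' : String) (h : k' ≠ k) :
    (d.erase k).get? k' = d.get? k' := by
  rw [PySem.Dict.erase.eq_def, PySem.Dict.get?.eq_def, PySem.Dict.get?.eq_def]
  rw [pvFind?_filter_ne _ _ _ h]

theorem pvNodup_keys_erase (d : PySem.Dict String Int) (k : String) (h : d.keys.Nodup) :
    (d.erase k).keys.Nodup := by
  rw [PySem.Dict.erase.eq_def]
  exact List.Nodup.sublist (List.Sublist.map _ List.filter_sublist) h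

theorem pvPendSpec_step_ne (hand : List String) (t : Nat) (ht : t < hand.length) (r : String)
    (hne : rank_of hand[t] ≠ r) : pvPendSpec hand t r = pvPendSpec hand (t + 1) r := by
  unfold pvPendSpec
  by_cases hJ : r = "JOKER"
  · simp [hJ]
  · rw [if_neg hJ, if_neg hJ]
    have hdrop : (hand.map rank_of).drop t = rank_of hand[t] :: (hand.map rank_of).drop (t + 1) := by
      rw [List.drop_eq_getElem_cons (by simpa using ht)]
      simp
    have hner : r ≠ rank_of hand[t] := fun h => hne h.symm
    rw [hdrop, PySem.List.index?_cons_of_ne _ hne]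
    have hcnt : List.count r (rank_of hand[t] :: List.drop (t + 1) (List.map rank_of hand))
        = List.count r (List.drop (t + 1) (List.map rank_of hand)) := by
      simp [hne]
    rw [hcnt]
    cases hidx : PySem.List.index? ((hand.map rank_of).drop (t + 1)) r with
    | none => simp
    | some j =>
      simp only [Option.map_some]
      split_ifs with hc
      · congr 1
        push_cast
        ring
      · rfl

theorem pvKeepArr_get (hand : List String) (t k : Nat) (hk : k < hand.length) :
    (pvKeepArr hand t).getD k false = (decide (t ≤ k) && (rank_of hand[k] == "JOKER")) := by
  unfold pvKeepArr
  rw [List.getD_eq_getElem _ _ (by simpa using hk)]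
  simp only [List.getElem_map, List.getElem_range]
  rw [List.getD_eq_getElem hand "" hk]

theorem pvKeepArr_length (hand : List String) (t : Nat) :
    (pvKeepArr hand t).length = hand.length := by
  simp [pvKeepArr]

theorem pvKeepArr_top (hand : List String) :
    pvKeepArr hand hand.length = List.replicate hand.length false := by
  apply List.ext_getElem
  · simp [pvKeepArr]
  · intro k h1 h2
    unfold pvKeepArr at h1 ⊢
    simp only [List.getElem_map, List.getElem_range, List.getElem_replicate]
    have : ¬ (hand.length ≤ k) := by simpa using h1
    simp [this]

theorem pvKeepArr_step_nonjoker (hand : List String) (t : Nat) (ht : t < hand.length)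
    (hJ : rank_of hand[t] ≠ "JOKER") : pvKeepArr hand (t + 1) = pvKeepArr hand t := by
  apply List.ext_getElem
  · simp [pvKeepArr]
  · intro k h1 h2
    unfold pvKeepArr
    simp only [List.getElem_map, List.getElem_range]
    by_cases hkt : k = t
    · subst hkt
      rw [List.getD_eq_getElem hand "" ht]
      have hb : (rank_of hand[k] == "JOKER") = false := by simpa using hJ
      simp [hb]
    · have hd : decide (t + 1 ≤ k) = decide (t ≤ k) := by
        simp only [decide_eq_decide]
        omega
      rw [hd]

theorem pvKeepArr_step_joker (hand : List String) (t : Nat) (ht : t < hand.length)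
    (hJ : rank_of hand[t] = "JOKER") :
    (pvKeepArr hand (t + 1)).set t true = pvKeepArr hand t := by
  apply List.ext_getElem
  · simp [pvKeepArr]
  · intro k h1 h2
    have hk : k < hand.length := by simpa [pvKeepArr] using h2
    simp only [List.getElem_set]
    by_cases hkt : t = k
    · subst hkt
      unfold pvKeepArr
      simp only [List.getElem_map, List.getElem_range]
      rw [List.getD_eq_getElem hand "" hk]
      simp [hJ]
    · rw [if_neg hkt]
      unfold pvKeepArr
      simp only [List.getElem_map, List.getElem_range]
      have hd : decide (t + 1 ≤ k) = decide (t ≤ k) := by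
        simp only [decide_eq_decide]
        omega
      rw [hd]

-- the backward scan invariant: after processing indices n-1, …, t the keep-array is
-- pvKeepArr t and the pending dict realises pvPendSpec t
theorem pvScan_inv (hand : List String) (m t : Nat) (hmt : t + m = hand.length) :
    ∃ d : PySem.Dict String Int,
      ((List.range m).map (fun (k : Nat) => (hand.length : Int) - 1 - (k : Int))).foldl (pvStepB hand)
          (List.replicate hand.length false, PySem.Dict.empty)
        = (pvKeepArr hand t, d)
      ∧ (∀ r, d.get? r = pvPendSpec hand t r) ∧ d.keys.Nodup := by
  induction m generalizing t with
  | zero =>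
    refine ⟨PySem.Dict.empty, ?_, ?_, PySem.Dict.nodup_keys_empty⟩
    · have : t = hand.length := by omega
      subst this
      simp [pvKeepArr_top]
    · intro r
      have : t = hand.length := by omega
      subst this
      unfold pvPendSpec
      rw [List.drop_eq_nil_of_le (by simp)]
      simp [PySem.List.index?]
  | succ m ih =>
    have ht : t < hand.length := by omega
    rcases ih (t + 1) (by omega) with ⟨d, hfold, hspec, hnd⟩
    have hlist : (List.range (m + 1)).map (fun (k : Nat) => (hand.length : Int) - 1 - (k : Int))
        = (List.range m).map (fun (k : Nat) => (hand.length : Int) - 1 - (k : Int)) ++ [(t : Int)] := by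
      rw [List.range_succ, List.map_append]
      simp only [List.map_cons, List.map_nil]
      congr 2
      omega
    rw [hlist, List.foldl_append, hfold]
    simp only [List.foldl_cons, List.foldl_nil]
    have hget : PySem.List.pyGetD hand (t : Int) "" = hand[t] := by
      rw [PySem.List.pyGetD_natCast]
      exact List.getD_eq_getElem hand "" ht
    have hdrop : (hand.map rank_of).drop t = rank_of hand[t] :: (hand.map rank_of).drop (t + 1) := by
      rw [List.drop_eq_getElem_cons (by simpa using ht)]
      simp
    by_cases hJ : rank_of hand[t] = "JOKER"
    · refine ⟨d, ?_, ?_, hnd⟩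
      · unfold pvStepB
        rw [hget]
        simp only [hJ, beq_self_eq_true, if_pos, Int.toNat_natCast]
        rw [pvKeepArr_step_joker hand t ht hJ]
      · intro r
        by_cases hr : rank_of hand[t] = r
        · have hrJ : r = "JOKER" := hr ▸ hJ
          rw [hspec r]
          unfold pvPendSpec
          rw [if_pos hrJ, if_pos hrJ]
        · rw [hspec r, pvPendSpec_step_ne hand t ht r hr]
    · unfold pvStepB
      rw [hget]
      rw [if_neg (by simpa using hJ)]
      by_cases hc : d.contains (rank_of hand[t])
      · rw [if_pos hc]
        refine ⟨d.erase (rank_of hand[t]), by rw [pvKeepArr_step_nonjoker hand t ht hJ],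
          ?_, pvNodup_keys_erase _ _ hnd⟩
        intro r
        by_cases hr : r = rank_of hand[t]
        · subst hr
          rw [pvGet?_erase_self]
          -- the count in the suffix from t is even, so the spec is none
          rw [PySem.Dict.contains_eq_isSome_get?, hspec] at hc
          unfold pvPendSpec at hc ⊢
          rw [if_neg hJ] at hc ⊢
          rw [hdrop, PySem.List.index?_cons_self, List.count_cons_self]
          cases hidx : PySem.List.index? ((hand.map rank_of).drop (t + 1)) (rank_of hand[t]) with
          | none =>
            rw [hidx] at hc
            simp at hc
          | some j =>
            rw [hidx] at hc
            have hodd : ((hand.map rank_of).drop (t + 1)).count (rank_of hand[t]) % 2 = 1 := by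
              by_contra hcon
              simp [hcon] at hc
            have hev : ¬ ((((hand.map rank_of).drop (t + 1)).count (rank_of hand[t]) + 1) % 2 = 1) := by
              omega
            simp [hev]
        · rw [pvGet?_erase_of_ne _ _ _ hr, hspec r,
            pvPendSpec_step_ne hand t ht r (fun h => hr h.symm)]
      · rw [if_neg hc]
        refine ⟨d.insert (rank_of hand[t]) (t : Int),
          by rw [pvKeepArr_step_nonjoker hand t ht hJ], ?_,
          PySem.Dict.nodup_keys_insert _ _ _ hnd⟩
        intro r
        by_cases hr : r = rank_of hand[t]
        · subst hr
          rw [PySem.Dict.get?_insert_self]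
          -- the count in the suffix from t+1 is even
          rw [PySem.Dict.contains_eq_isSome_get?, hspec] at hc
          unfold pvPendSpec at hc ⊢
          rw [if_neg hJ] at hc ⊢
          have hcev : ((hand.map rank_of).drop (t + 1)).count (rank_of hand[t]) % 2 = 0 := by
            cases hidx : PySem.List.index? ((hand.map rank_of).drop (t + 1)) (rank_of hand[t]) with
            | none =>
              have hnm : rank_of hand[t] ∉ (hand.map rank_of).drop (t + 1) := by
                intro hmem
                have := (PySem.List.index?_isSome_iff _ _).mpr hmem
                rw [hidx] at this
                simp at this
              rw [List.count_eq_zero.mpr hnm]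
            | some j =>
              rw [hidx] at hc
              by_contra hcon
              have hodd : ((hand.map rank_of).drop (t + 1)).count (rank_of hand[t]) % 2 = 1 := by
                omega
              simp [hodd] at hc
          rw [hdrop, PySem.List.index?_cons_self, List.count_cons_self]
          have hov : (((hand.map rank_of).drop (t + 1)).count (rank_of hand[t]) + 1) % 2 = 1 := by
            omega
          simp [hov]
        · rw [PySem.Dict.get?_insert_of_ne _ _ hr, hspec r,
            pvPendSpec_step_ne hand t ht r (fun h => hr h.symm)]

theorem pvSetTrue_getD (vs : List Int) (arr : List Bool) (k : Nat) (hk : k < arr.length)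
    (hvs : ∀ v ∈ vs, 0 ≤ v) :
    (vs.foldl (fun a i => a.set i.toNat true) arr).getD k false
      = (arr.getD k false || decide ((k : Int) ∈ vs)) := by
  induction vs generalizing arr with
  | nil => simp
  | cons v vs ih =>
    rw [List.foldl_cons, ih _ (by simpa using hk) (fun v hv => hvs v (List.mem_cons_of_mem _ hv))]
    rw [List.getD_eq_getElem _ _ (by simpa using hk), List.getD_eq_getElem _ _ hk,
      List.getElem_set]
    have hv0 : 0 ≤ v := hvs v (List.mem_cons_self ..)
    by_cases hvk : v.toNat = k
    · have : (k : Int) = v := by omega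
      simp [hvk, this]
    · have : (k : Int) ≠ v := by omega
      simp [hvk, this]

-- the keep-array that drives B's forward pass realises pvKeep
theorem pvKeepFinal (hand : List String) (d : PySem.Dict String Int)
    (hspec : ∀ r, d.get? r = pvPendSpec hand 0 r) (hnd : d.keys.Nodup) (k : Nat)
    (hk : k < hand.length) :
    (d.values.foldl (fun a i => a.set i.toNat true) (pvKeepArr hand 0)).getD k false
      = pvKeep hand ((k : Int), hand[k]) := by
  have hval : ∀ v ∈ d.values, 0 ≤ v := by
    intro v hv
    rcases List.mem_map.mp hv with ⟨⟨r, v'⟩, hmem, hv'⟩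
    cases hv'
    have hsp := PySem.Dict.get?_of_mem_items d hmem hnd
    rw [hspec r] at hsp
    unfold pvPendSpec at hsp
    by_cases hJ : r = "JOKER"
    · rw [if_pos hJ] at hsp
      simp at hsp
    · rw [if_neg hJ] at hsp
      cases hidx : PySem.List.index? ((hand.map rank_of).drop 0) r with
      | none =>
        rw [hidx] at hsp
        simp at hsp
      | some j =>
        rw [hidx] at hsp
        by_cases hcnt : (hand.map rank_of).count r % 2 = 1
        · simp [hcnt] at hsp
          omega
        · simp [hcnt] at hsp
  rw [pvSetTrue_getD _ _ k (by simpa [pvKeepArr_length] using hk) hval]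
  rw [pvKeepArr_get hand 0 k hk]
  have hmem : ((k : Int) ∈ d.values) ↔ (∃ r, pvPendSpec hand 0 r = some (k : Int)) := by
    constructor
    · intro hv
      rcases List.mem_map.mp hv with ⟨⟨r, v'⟩, hmemi, hv'⟩
      cases hv'
      exact ⟨r, by rw [← hspec r]; exact PySem.Dict.get?_of_mem_items d hmemi hnd⟩
    · rintro ⟨r, hr⟩
      rw [← hspec r] at hr
      exact List.mem_map.mpr ⟨(r, (k : Int)), PySem.Dict.mem_items_of_get?_eq_some d hr, rfl⟩
  have hpend : (∃ r, pvPendSpec hand 0 r = some (k : Int))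
      ↔ (rank_of hand[k] ≠ "JOKER" ∧ (hand.map rank_of).count (rank_of hand[k]) % 2 = 1
          ∧ PySem.List.index? (hand.map rank_of) (rank_of hand[k]) = some k) := by
    constructor
    · rintro ⟨r, hr⟩
      unfold pvPendSpec at hr
      by_cases hJ : r = "JOKER"
      · rw [if_pos hJ] at hr
        simp at hr
      · rw [if_neg hJ] at hr
        cases hidx : PySem.List.index? ((hand.map rank_of).drop 0) r with
        | none =>
          rw [hidx] at hr
          simp at hr
        | some j =>
          rw [hidx] at hr
          by_cases hcnt : (hand.map rank_of).count r % 2 = 1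
          · simp [hcnt] at hr
            have hjk : j = k := by omega
            subst hjk
            rw [List.drop_zero] at hidx
            rcases PySem.List.getElem_of_index?_eq_some hidx with ⟨hj, hgetr, _⟩
            have hrank : rank_of hand[j] = r := by
              rw [← hgetr]
              simp
            refine ⟨?_, ?_, ?_⟩ <;> rw [hrank] <;> assumption
          · simp [hcnt] at hr
    · rintro ⟨hJ, hcnt, hidx⟩
      refine ⟨rank_of hand[k], ?_⟩
      unfold pvPendSpec
      rw [if_neg hJ, List.drop_zero, hidx]
      simp [hcnt]
  unfold pvKeep
  dsimp only
  by_cases hJ : rank_of hand[k] = "JOKER"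
  · have : ¬ ((k : Int) ∈ d.values) := by
      rw [hmem, hpend]
      rintro ⟨h, _, _⟩
      exact h hJ
    simp [hJ, this]
  · rw [PySem.List.count_eq]
    have h0 : decide (0 ≤ k) = true := by simp
    rw [h0, Bool.true_and]
    have hJb : (rank_of hand[k] == "JOKER") = false := by simpa using hJ
    rw [hJb]
    simp only [Bool.false_or]
    by_cases hv : (k : Int) ∈ d.values
    · rcases (hpend.mp (hmem.mp hv)) with ⟨_, hcnt, hidx⟩
      rw [hidx]
      simp [hv, hcnt]
    · have hnot := hv
      rw [hmem, hpend] at hnot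
      rw [decide_eq_false (by simpa using hv)]
      symm
      rw [Bool.and_eq_false_iff]
      by_cases hcnt : (hand.map rank_of).count (rank_of hand[k]) % 2 = 1
      · right
        cases hidx : PySem.List.index? (hand.map rank_of) (rank_of hand[k]) with
        | none => simp
        | some j =>
          have hjk : j ≠ k := by
            intro h
            exact hnot ⟨hJ, hcnt, h ▸ hidx⟩
          simp only [Option.map_some, beq_eq_false_iff_ne, ne_eq, Option.some_inj,
            Int.ofNat_eq_natCast]
          omega
      · left
        simpa using hcnt
  
-- B's forward pass equals the pvKeep-filter fold over enumerate hand 0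
theorem pvForward (hand : List String) (keep : List Bool)
    (hkeep : ∀ (k : Nat) (hk : k < hand.length), keep.getD k false = pvKeep hand ((k : Int), hand[k]'hk)) :
    (PySem.List.pyRange 0 (hand.length : Int) 1).foldl
        (fun (st : List String × PySem.Dict Int Int) i =>
          if keep.getD i.toNat false then
            (st.1 ++ [PySem.List.pyGetD hand i ""], st.2.insert i (st.1.length : Int))
          else st)
        ([], PySem.Dict.empty)
      = ((pvKeptP hand).map (fun p => p.2),
         (PySem.List.enumerate (pvKept hand) 0).foldl (fun d r => d.insert r.2 r.1)
           PySem.Dict.empty) := by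
  have henum : PySem.List.enumerate hand 0
      = (PySem.List.pyRange 0 (hand.length : Int) 1).map
          (fun j => (j, PySem.List.pyGetD hand j "")) := by
    have := PySem.List.enumerate_eq_map_pyRange hand ""
    simpa using this
  have hfold : (PySem.List.enumerate hand 0).foldl
      (fun (st : List String × PySem.Dict Int Int) p =>
        if pvKeep hand p then (st.1 ++ [p.2], st.2.insert p.1 (st.1.length : Int)) else st)
      ([], PySem.Dict.empty)
      = ((pvKeptP hand).map (fun p => p.2),
         (PySem.List.enumerate (pvKept hand) 0).foldl (fun d r => d.insert r.2 r.1)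
           PySem.Dict.empty) := by
    rw [pvB_fold_inv]
    simp [pvKeptP, pvKept]
  rw [henum, List.foldl_map] at hfold
  rw [← hfold]
  apply PySem.List.foldl_congr_mem
  intro acc i hi
  rcases PySem.List.mem_pyRange_one.mp hi with ⟨h0, hn⟩
  have hik : i = ((i.toNat : Nat) : Int) := by omega
  have hkn : i.toNat < hand.length := by omega
  have hgd : PySem.List.pyGetD hand i "" = hand[i.toNat] := by
    have hcast := PySem.List.pyGetD_natCast hand i.toNat ""
    rw [← hik] at hcast
    rw [hcast]
    exact List.getD_eq_getElem hand "" hkn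
  have hpair : (((i.toNat : Nat) : Int), hand[i.toNat]) = (i, PySem.List.pyGetD hand i "") := by
    rw [hgd, ← hik]
  rw [hkeep i.toNat hkn, hpair]

-- ===== VERDICT (by name: the statement is the Claim_ definition above) =====
theorem remove_pairs_with_index_tracking_spec : Claim_equal_remove_pairs_with_index_tracking := by
  intro hand obs_map _
  unfold Spec_remove_pairs_with_index_tracking
  simp only [remove_pairs_with_index_tracking, remove_pairs_with_index_tracking_alt]
  -- the backward scan over range(n-1, -1, -1)
  have hrange : PySem.List.pyRange ((hand.length : Int) - 1) (-1) (-1)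
      = (List.range hand.length).map (fun (k : Nat) => (hand.length : Int) - 1 - (k : Int)) := by
    have hn : ((hand.length : Int) - 1 - (-1)).toNat = hand.length := by omega
    rw [PySem.List.pyRange_neg_one, hn]
  rcases pvScan_inv hand hand.length 0 (by omega) with ⟨d, hfold, hspec, hnd⟩
  rw [hrange, hfold]
  rw [pvForward hand _ (fun k hk => pvKeepFinal hand d hspec hnd k hk)]
  -- A's side
  rw [show (PySem.List.enumerate hand 0).foldl
      (fun (d : PySem.Dict String (List Int)) p => d.modify (rank_of p.2) [] (fun l => l ++ [p.1]))
      PySem.Dict.empty = pvGroups hand from rfl]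
  rw [pvKeptA_eq, pvNewHand]
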